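-- pv_equiv track=rewrite | github.com/zellij-org/awesome-zellij | scripts/update_readme_stars_utils.py | replace_or_insert_last_updated_line
-- ===== SOURCE A (Python) =====
-- def replace_or_insert_last_updated_line(
--     readme_lines: list[str],
--     date_stamp_text: str,
-- ) -> list[str]:
--     """Set the README `Last updated:` line, adding it when missing."""
--     last_updated_prefix = "Last updated:"
--
--     for line_index, readme_line in enumerate(readme_lines):
--         if readme_line.startswith(last_updated_prefix):
--             readme_lines[line_index] = f"{last_updated_prefix} {date_stamp_text}"
--             return readme_lines
--
--     community_anchor_prefix = "All the resources listed are community-driven:"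
--     for line_index, readme_line in enumerate(readme_lines):
--         if readme_line.startswith(community_anchor_prefix):
--             insertion_line_index = line_index + 1
--             readme_lines[insertion_line_index:insertion_line_index] = [
--                 "",
--                 f"{last_updated_prefix} {date_stamp_text}",
--             ]
--             return readme_lines
--
--     # Fall back to inserting the timestamp at the top when no anchor exists.
--     readme_lines.insert(0, f"{last_updated_prefix} {date_stamp_text}")
--     readme_lines.insert(1, "")
--     return readme_lines
-- ===== SOURCE B (Python) =====
-- def replace_or_insert_last_updated_line(
--     readme_lines: list[str],
--     date_stamp_text: str,
-- ) -> list[str]: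
--     """Set the README `Last updated:` line, adding it when missing."""
--     last_updated_prefix = "Last updated:"
--     community_anchor_prefix = "All the resources listed are community-driven:"
--
--     # One pass: remember the first index of each marker, never stopping early.
--     last_updated_index = None
--     anchor_index = None
--     for line_index, readme_line in enumerate(readme_lines):
--         if last_updated_index is None and readme_line.startswith(last_updated_prefix):
--             last_updated_index = line_index
--         if anchor_index is None and readme_line.startswith(community_anchor_prefix):
--             anchor_index = line_index
--
--     new_line = f"{last_updated_prefix} {date_stamp_text}"
--     if last_updated_index is not None:
--         readme_lines[last_updated_index] = new_line
--     elif anchor_index is not None: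
--         readme_lines[anchor_index + 1:anchor_index + 1] = ["", new_line]
--     else:
--         readme_lines[0:0] = [new_line, ""]
--     return readme_lines
-- ===== Notes on version B (the rewrite author's own statement) =====
-- stated objective: alternative
-- what changed: Replaces A's two sequential early-returning scans with a single index-gathering pass over the lines followed by one decision block that edits at the recorded index.
import Mathlib
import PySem

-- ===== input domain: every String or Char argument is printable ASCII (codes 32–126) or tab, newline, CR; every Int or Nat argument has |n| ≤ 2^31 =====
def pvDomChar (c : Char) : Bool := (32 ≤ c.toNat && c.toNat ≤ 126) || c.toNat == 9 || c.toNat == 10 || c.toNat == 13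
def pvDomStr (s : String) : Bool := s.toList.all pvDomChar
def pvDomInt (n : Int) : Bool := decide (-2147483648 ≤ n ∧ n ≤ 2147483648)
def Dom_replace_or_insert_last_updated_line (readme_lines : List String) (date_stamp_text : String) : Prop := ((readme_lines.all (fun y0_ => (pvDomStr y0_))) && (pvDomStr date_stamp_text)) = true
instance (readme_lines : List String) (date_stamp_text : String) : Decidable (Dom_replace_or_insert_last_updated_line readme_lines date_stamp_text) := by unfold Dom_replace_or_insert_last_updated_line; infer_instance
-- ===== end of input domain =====

-- B replaces A's two sequential early-returning scans with one index-gathering pass plus a decision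
-- block (objective: alternative). Both Pythons mutate readme_lines in place the same way; the
-- equivalence proved here is about the returned list.

-- ===== PORT A =====
def pvLU : String := "Last updated:"
def pvAnchor : String := "All the resources listed are community-driven:"
def pvNewLine (date_stamp_text : String) : String := pvLU ++ " " ++ date_stamp_text

-- first for-loop of A: replace the first `Last updated:` line and return, else none
def pvALoop1 (date_stamp_text : String) : List String → Option (List String)
  | [] => none
  | l :: ls =>
    if PySem.Str.startswith l pvLU then some (pvNewLine date_stamp_text :: ls)
    else (pvALoop1 date_stamp_text ls).map (l :: ·)

-- second for-loop of A: splice ["", new line] after the first anchor line and return, else none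
def pvALoop2 (date_stamp_text : String) : List String → Option (List String)
  | [] => none
  | l :: ls =>
    if PySem.Str.startswith l pvAnchor then
      some (l :: "" :: pvNewLine date_stamp_text :: ls)
    else (pvALoop2 date_stamp_text ls).map (l :: ·)

def replace_or_insert_last_updated_line (readme_lines : List String) (date_stamp_text : String) : List String :=
  match pvALoop1 date_stamp_text readme_lines with
  | some r => r
  | none =>
    match pvALoop2 date_stamp_text readme_lines with
    | some r => r
    | none => pvNewLine date_stamp_text :: "" :: readme_lines

-- ===== PORT B =====
-- B's single pass: remember the first index of each marker, never stopping early
def pvBScan : List String → Nat → Option Nat → Option Nat → Option Nat × Option Nat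
  | [], _, lu, anc => (lu, anc)
  | l :: ls, i, lu, anc =>
    let lu' := if lu.isNone && PySem.Str.startswith l pvLU then some i else lu
    let anc' := if anc.isNone && PySem.Str.startswith l pvAnchor then some i else anc
    pvBScan ls (i + 1) lu' anc'

def replace_or_insert_last_updated_line_alt (readme_lines : List String) (date_stamp_text : String) : List String :=
  let scan := pvBScan readme_lines 0 none none
  let newLine := pvLU ++ " " ++ date_stamp_text
  match scan.1 with
  | some i => readme_lines.set i newLine
  | none =>
    match scan.2 with
    | some j => readme_lines.take (j + 1) ++ ["", newLine] ++ readme_lines.drop (j + 1)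
    | none => newLine :: "" :: readme_lines

-- ===== PRECONDITION & SPEC =====
def Spec_replace_or_insert_last_updated_line (readme_lines : List String) (date_stamp_text : String) (out : List String) : Prop := out = replace_or_insert_last_updated_line_alt readme_lines date_stamp_text
instance (readme_lines : List String) (date_stamp_text : String) (out : List String) : Decidable (Spec_replace_or_insert_last_updated_line readme_lines date_stamp_text out) := by unfold Spec_replace_or_insert_last_updated_line; infer_instance

-- ===== CLAIM (what is proved, stated in full; the proofs are below) =====
def Claim_equal_replace_or_insert_last_updated_line : Prop := ∀ (readme_lines : List String) (date_stamp_text : String), Dom_replace_or_insert_last_updated_line readme_lines date_stamp_text → Spec_replace_or_insert_last_updated_line readme_lines date_stamp_text (replace_or_insert_last_updated_line readme_lines date_stamp_text)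

-- ===== LEMMAS AND PROOFS =====

-- B's scan computes the (offset) first index of each marker
lemma pvBScan_eq (ls : List String) (i : Nat) (lu anc : Option Nat) :
    pvBScan ls i lu anc =
      (lu.orElse (fun _ => (ls.findIdx? (PySem.Str.startswith · pvLU)).map (· + i)),
       anc.orElse (fun _ => (ls.findIdx? (PySem.Str.startswith · pvAnchor)).map (· + i))) := by
  induction ls generalizing i lu anc with
  | nil => simp [pvBScan]
  | cons l ls ih =>
    rw [pvBScan, ih]
    simp only [PySem.Str.startswith_eq, List.findIdx?_cons]
    cases lu <;> cases anc <;>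
      by_cases h1 : PySem.Chars.startswith l.toList pvLU.toList = true <;>
      by_cases h2 : PySem.Chars.startswith l.toList pvAnchor.toList = true <;>
      simp [h1, h2, Option.orElse, Option.map_map, Nat.add_comm 1]

-- A's first loop in terms of findIdx? and List.set
lemma pvALoop1_eq (d : String) (ls : List String) :
    pvALoop1 d ls = (ls.findIdx? (PySem.Str.startswith · pvLU)).map
      (fun i => ls.set i (pvNewLine d)) := by
  induction ls with
  | nil => simp [pvALoop1]
  | cons l ls ih =>
    rw [pvALoop1, ih]
    simp only [PySem.Str.startswith_eq, List.findIdx?_cons]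
    by_cases h : PySem.Chars.startswith l.toList pvLU.toList = true <;>
      simp [h, Option.map_map]
    congr 1

-- A's second loop in terms of findIdx? and take/drop splicing
lemma pvALoop2_eq (d : String) (ls : List String) :
    pvALoop2 d ls = (ls.findIdx? (PySem.Str.startswith · pvAnchor)).map
      (fun j => ls.take (j + 1) ++ ["", pvNewLine d] ++ ls.drop (j + 1)) := by
  induction ls with
  | nil => simp [pvALoop2]
  | cons l ls ih =>
    rw [pvALoop2, ih]
    simp only [PySem.Str.startswith_eq, List.findIdx?_cons]
    by_cases h : PySem.Chars.startswith l.toList pvAnchor.toList = true <;>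
      simp [h, Option.map_map]
    congr 1

-- ===== VERDICT (by name: the statement is the Claim_ definition above) =====
theorem replace_or_insert_last_updated_line_spec : Claim_equal_replace_or_insert_last_updated_line := by
  intro readme_lines date_stamp_text _
  show replace_or_insert_last_updated_line readme_lines date_stamp_text = _
  rw [replace_or_insert_last_updated_line, replace_or_insert_last_updated_line_alt,
      pvALoop1_eq, pvALoop2_eq, pvBScan_eq]
  simp only [Option.orElse, Option.map, pvNewLine]
  cases h1 : readme_lines.findIdx? (PySem.Str.startswith · pvLU) <;>
    cases h2 : readme_lines.findIdx? (PySem.Str.startswith · pvAnchor) <;>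
    simp
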